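-- pv_equiv track=rewrite | github.com/storylike/BidBot | Policies/Base.py | CountRehaoAndSort
-- ===== SOURCE A (Python) =====
-- def CountRehaoAndSort(list_raw):
--     """
--     Count numbers from today's database and generate a sorted rehao list.
--     Note, count recently continuously occurred times, instead of whole occurrence of this day.
--     :param list_raw:
--     :return:
--     """
--     rehao_temp = {'0': 0, '1': 0, '2': 0, '3': 0, '4': 0, '5': 0, '6': 0, '7': 0, '8': 0, '9': 0}
--     for items in list_raw:
--         for k, v in rehao_temp.items():
--             if k in items:
--                 rehao_temp[k] = rehao_temp[k] + 1
--             else: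
--                 rehao_temp[k] = 0
--     result = sorted(rehao_temp.items(), key=lambda d: d[1], reverse=True)
--     return result
-- ===== SOURCE B (Python) =====
-- def CountRehaoAndSort(list_raw):
--     """
--     Same result as A: for each digit, the value is the length of the trailing
--     run of consecutive items containing it, computed by scanning backwards
--     with an early break instead of a forward increment-or-reset pass.
--     """
--     rehao = {}
--     for digit in '0123456789':
--         n = 0
--         for item in reversed(list_raw):
--             if digit in item:
--                 n += 1
--             else:
--                 break
--         rehao[digit] = n
--     return sorted(rehao.items(), key=lambda d: d[1], reverse=True)
-- ===== Notes on version B (the rewrite author's own statement) =====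
-- stated objective: faster
-- what changed: Replaces A's forward scan that increments-or-resets all ten digit counters across every item with a per-digit backward scan over reversed(list_raw) that counts while the digit is present and breaks at the first item lacking it, then sorts as before.
import Mathlib
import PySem

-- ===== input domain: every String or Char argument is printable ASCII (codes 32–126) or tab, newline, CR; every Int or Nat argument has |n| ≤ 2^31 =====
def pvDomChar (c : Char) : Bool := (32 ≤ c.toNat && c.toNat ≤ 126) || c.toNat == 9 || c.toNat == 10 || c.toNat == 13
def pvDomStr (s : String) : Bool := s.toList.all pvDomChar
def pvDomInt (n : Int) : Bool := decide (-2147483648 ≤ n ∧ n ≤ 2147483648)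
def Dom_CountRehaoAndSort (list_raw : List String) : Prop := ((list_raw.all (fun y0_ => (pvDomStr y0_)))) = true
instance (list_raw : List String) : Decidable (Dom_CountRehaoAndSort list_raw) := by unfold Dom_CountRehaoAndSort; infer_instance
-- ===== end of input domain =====

-- B replaces A's forward increment-or-reset scan over the whole list by a per-digit
-- backward scan that stops at the first item lacking the digit (objective: alternative).

-- ===== PORT A =====
def pvDigits : List String := ["0", "1", "2", "3", "4", "5", "6", "7", "8", "9"]

-- the inner 'for k, v in rehao_temp.items(): rehao_temp[k] = …' loop of A
def pvStepA (d : PySem.Dict String Int) (items : String) : PySem.Dict String Int :=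
  d.items.foldl
    (fun d' kv => d'.insert kv.1 (if PySem.Str.isIn kv.1 items then kv.2 + 1 else 0)) d

def CountRehaoAndSort (list_raw : List String) : List (String × Int) :=
  let rehao_temp :=
    list_raw.foldl pvStepA (PySem.Dict.ofList (pvDigits.map (fun k => (k, (0 : Int)))))
  PySem.List.sorted rehao_temp.items (fun p => p.2) true

-- ===== PORT B =====
-- 'for item in reversed(list_raw): count while digit in item, break at the first miss'
def pvRunLen (digit : String) : List String → Int
  | [] => 0
  | item :: rest => if PySem.Str.isIn digit item then pvRunLen digit rest + 1 else 0

def CountRehaoAndSort_alt (list_raw : List String) : List (String × Int) :=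
  let rehao :=
    pvDigits.foldl (fun d dg => d.insert dg (pvRunLen dg list_raw.reverse)) PySem.Dict.empty
  PySem.List.sorted rehao.items (fun p => p.2) true

-- ===== PRECONDITION & SPEC =====
def Spec_CountRehaoAndSort (list_raw : List String) (out : List (String × Int)) : Prop := out = CountRehaoAndSort_alt list_raw
instance (list_raw : List String) (out : List (String × Int)) : Decidable (Spec_CountRehaoAndSort list_raw out) := by unfold Spec_CountRehaoAndSort; infer_instance

-- ===== CLAIM (what is proved, stated in full; the proofs are below) =====
def Claim_equal_CountRehaoAndSort : Prop := ∀ (list_raw : List String), Dom_CountRehaoAndSort list_raw → Spec_CountRehaoAndSort list_raw (CountRehaoAndSort list_raw)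

-- ===== LEMMAS AND PROOFS =====

-- one step of A's outer loop, on a dict whose items are the ten digits with arbitrary values
theorem pvStepA_mk (g : String → Int) (it : String) :
    pvStepA (PySem.Dict.mk (pvDigits.map (fun k => (k, g k)))) it
      = PySem.Dict.mk (pvDigits.map (fun k => (k, if PySem.Str.isIn k it then g k + 1 else 0))) := by
  simp [pvStepA, pvDigits, PySem.Dict.insert, PySem.Dict.contains]

-- A's whole outer fold, digit by digit
theorem pvFoldA_items (xs : List String) (g : String → Int) :
    (xs.foldl pvStepA (PySem.Dict.mk (pvDigits.map (fun k => (k, g k))))).items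
      = pvDigits.map
          (fun k => (k, xs.foldl (fun n it => if PySem.Str.isIn k it then n + 1 else 0) (g k))) := by
  induction xs generalizing g with
  | nil => rfl
  | cons x xs ih => simp only [List.foldl_cons, pvStepA_mk, ih]

-- A's per-digit increment-or-reset fold computes B's trailing-run length
theorem pvFoldl_run (k : String) (xs : List String) :
    xs.foldl (fun n it => if PySem.Str.isIn k it then n + 1 else 0) 0 = pvRunLen k xs.reverse := by
  induction xs using List.reverseRecOn with
  | nil => rfl
  | append_singleton xs x ih =>
      simp only [List.foldl_append, List.foldl_cons, List.foldl_nil, List.reverse_append,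
        List.reverse_cons, List.reverse_nil, List.nil_append, List.cons_append, pvRunLen, ih]

-- ===== VERDICT (by name: the statement is the Claim_ definition above) =====
theorem CountRehaoAndSort_spec : Claim_equal_CountRehaoAndSort := by
  intro list_raw _
  show CountRehaoAndSort list_raw = CountRehaoAndSort_alt list_raw
  unfold CountRehaoAndSort CountRehaoAndSort_alt
  have hB : (pvDigits.foldl (fun d dg => d.insert dg (pvRunLen dg list_raw.reverse))
        PySem.Dict.empty).items
      = pvDigits.map (fun dg => (dg, pvRunLen dg list_raw.reverse)) := by
    have := PySem.Dict.items_foldl_insert_fresh (l := pvDigits) (k := fun dg => dg)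
      (v := fun dg => pvRunLen dg list_raw.reverse) (d := PySem.Dict.empty)
      (by decide) (by decide)
    simpa using this
  have hA : (PySem.Dict.ofList (pvDigits.map (fun k => (k, (0 : Int)))))
      = PySem.Dict.mk (pvDigits.map (fun k => (k, (0 : Int)))) := by decide
  simp only [hA, hB, pvFoldA_items, pvFoldl_run]
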